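-- pv_equiv track=rewrite | github.com/HikaruEgashira/otel-hooks | src/otel_hooks/cli.py | _collect_provider_issues
-- ===== SOURCE A (Python) =====
-- def _collect_provider_issues(
--     otel_config: dict[str, object],
--     providers: list[str],
-- ) -> list[str]:
--     issues: list[str] = []
--
--     if not providers:
--         issues.append("No provider registered in hooks (use --provider flag with enable)")
--         return issues
--
--     for provider in providers:
--         if provider == "langfuse":
--             pcfg = otel_config.get("langfuse", {})
--             if isinstance(pcfg, dict):
--                 if not pcfg.get("public_key"):
--                     issues.append("langfuse.public_key not set")
--                 if not pcfg.get("secret_key"):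
--                     issues.append("langfuse.secret_key not set")
--         elif provider == "otlp":
--             pcfg = otel_config.get("otlp", {})
--             if isinstance(pcfg, dict) and not pcfg.get("endpoint"):
--                 issues.append("otlp.endpoint not set")
--
--     return issues
-- ===== SOURCE B (Python) =====
-- _REQUIRED_KEYS = {
--     "langfuse": ("public_key", "secret_key"),
--     "otlp": ("endpoint",),
-- }
--
--
-- def _collect_provider_issues(
--     otel_config: dict[str, object],
--     providers: list[str],
-- ) -> list[str]:
--     if not providers:
--         return ["No provider registered in hooks (use --provider flag with enable)"]
--
--     # Stage 1: compute each known provider's issue list ONCE (memo table);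
--     # messages are derived as f"{name}.{key} not set" rather than hardcoded.
--     memo: dict[str, list[str]] = {}
--     for name, keys in _REQUIRED_KEYS.items():
--         pcfg = otel_config.get(name, {})
--         if isinstance(pcfg, dict):
--             memo[name] = [f"{name}.{key} not set" for key in keys if not pcfg.get(key)]
--         else:
--             memo[name] = []
--
--     # Stage 2: concatenate the precomputed lists in providers order.
--     out: list[str] = []
--     for provider in providers:
--         out.extend(memo.get(provider, []))
--     return out
-- ===== Notes on version B (the rewrite author's own statement) =====
-- stated objective: alternative
-- what changed: Two-stage algorithm: precompute a memo table of each known provider's issue list once (messages synthesized as name+'.'+key+' not set' via filter-and-format over a required-keys table), then build the output by concatenating precomputed lists per requested provider, instead of A's single pass with hardcoded per-provider if/elif append branches.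
import Mathlib
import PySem

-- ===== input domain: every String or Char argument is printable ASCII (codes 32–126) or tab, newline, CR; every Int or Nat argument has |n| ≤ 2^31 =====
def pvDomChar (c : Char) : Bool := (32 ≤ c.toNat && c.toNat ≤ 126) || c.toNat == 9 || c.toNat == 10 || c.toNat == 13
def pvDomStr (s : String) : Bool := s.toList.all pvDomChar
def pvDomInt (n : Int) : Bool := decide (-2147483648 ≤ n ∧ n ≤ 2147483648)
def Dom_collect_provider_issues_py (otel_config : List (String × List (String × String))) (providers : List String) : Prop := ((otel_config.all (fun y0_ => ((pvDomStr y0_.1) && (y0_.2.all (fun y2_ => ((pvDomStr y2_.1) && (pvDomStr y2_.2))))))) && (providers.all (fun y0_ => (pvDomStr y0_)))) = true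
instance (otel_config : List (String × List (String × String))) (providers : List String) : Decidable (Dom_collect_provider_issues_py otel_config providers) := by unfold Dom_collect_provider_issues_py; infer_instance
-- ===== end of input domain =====

-- B is a two-stage algorithm: precompute each known provider's issue list once in a memo
-- table (messages synthesized as name ++ "." ++ key ++ " not set" by filter-and-format),
-- then concatenate precomputed lists per requested provider; alternative, same cost.


-- ===== PORT A =====
-- pcfg.get(k) is falsy exactly when the key is missing or maps to "" (values here are strings),
-- so 'not pcfg.get(k)' is ported as 'getD pcfg k "" = ""'; the isinstance(pcfg, dict) guard is
-- always true under the type convention (all config values are dicts) and is dropped.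
def collect_provider_issues_py (otel_config : List (String × List (String × String))) (providers : List String) : List String :=
  if providers = [] then
    ["No provider registered in hooks (use --provider flag with enable)"]
  else
    providers.foldl (fun issues provider =>
      if provider = "langfuse" then
        let pcfg := PySem.Dict.mk otel_config |>.getD "langfuse" []
        let issues :=
          if (PySem.Dict.mk pcfg).getD "public_key" "" = "" then
            issues ++ ["langfuse.public_key not set"] else issues
        if (PySem.Dict.mk pcfg).getD "secret_key" "" = "" then
          issues ++ ["langfuse.secret_key not set"] else issues
      else if provider = "otlp" then
        let pcfg := PySem.Dict.mk otel_config |>.getD "otlp" []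
        if (PySem.Dict.mk pcfg).getD "endpoint" "" = "" then
          issues ++ ["otlp.endpoint not set"] else issues
      else issues) []

-- ===== PORT B =====
def pvRequiredKeys : List (String × List String) :=
  [("langfuse", ["public_key", "secret_key"]), ("otlp", ["endpoint"])]

-- the comprehension [f"{name}.{key} not set" for key in keys if not pcfg.get(key)]
def pvIssuesFor (otel_config : List (String × List (String × String))) (name : String) (keys : List String) : List String :=
  let pcfg := PySem.Dict.mk otel_config |>.getD name []
  (keys.filter (fun key => (PySem.Dict.mk pcfg).getD key "" = "")).map
    (fun key => name ++ "." ++ key ++ " not set")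

def collect_provider_issues_py_alt (otel_config : List (String × List (String × String))) (providers : List String) : List String :=
  if providers = [] then
    ["No provider registered in hooks (use --provider flag with enable)"]
  else
    let memo := pvRequiredKeys.foldl
      (fun d nk => d.insert nk.1 (pvIssuesFor otel_config nk.1 nk.2))
      (PySem.Dict.mk [])
    providers.foldl (fun out provider => out ++ memo.getD provider []) []

-- ===== PRECONDITION & SPEC =====
def Spec_collect_provider_issues_py (otel_config : List (String × List (String × String))) (providers : List String) (out : List String) : Prop := out = collect_provider_issues_py_alt otel_config providers
instance (otel_config : List (String × List (String × String))) (providers : List String) (out : List String) : Decidable (Spec_collect_provider_issues_py otel_config providers out) := by unfold Spec_collect_provider_issues_py; infer_instance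

-- ===== CLAIM (what is proved, stated in full; the proofs are below) =====
def Claim_equal_collect_provider_issues_py : Prop := ∀ (otel_config : List (String × List (String × String))) (providers : List String), Dom_collect_provider_issues_py otel_config providers → Spec_collect_provider_issues_py otel_config providers (collect_provider_issues_py otel_config providers)

-- ===== LEMMAS AND PROOFS =====
theorem memo_getD_eq (otel_config : List (String × List (String × String))) (provider : String) :
    (pvRequiredKeys.foldl
      (fun d nk => d.insert nk.1 (pvIssuesFor otel_config nk.1 nk.2))
      (PySem.Dict.mk [])).getD provider [] =
    (if provider = "langfuse" then pvIssuesFor otel_config "langfuse" ["public_key", "secret_key"]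
     else if provider = "otlp" then pvIssuesFor otel_config "otlp" ["endpoint"]
     else []) := by
  by_cases h1 : provider = "langfuse"
  · subst h1
    simp [pvRequiredKeys, PySem.Dict.insert, PySem.Dict.getD, PySem.Dict.get?]
  · by_cases h2 : provider = "otlp"
    · subst h2
      simp [pvRequiredKeys, PySem.Dict.insert, PySem.Dict.getD, PySem.Dict.get?]
    · simp [pvRequiredKeys, PySem.Dict.insert, PySem.Dict.getD, PySem.Dict.get?,
        h1, h2, Ne.symm h1, Ne.symm h2]

theorem collect_step_eq (otel_config : List (String × List (String × String)))
    (issues : List String) (provider : String) :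
    (if provider = "langfuse" then
        let pcfg := PySem.Dict.mk otel_config |>.getD "langfuse" []
        let issues :=
          if (PySem.Dict.mk pcfg).getD "public_key" "" = "" then
            issues ++ ["langfuse.public_key not set"] else issues
        if (PySem.Dict.mk pcfg).getD "secret_key" "" = "" then
          issues ++ ["langfuse.secret_key not set"] else issues
      else if provider = "otlp" then
        let pcfg := PySem.Dict.mk otel_config |>.getD "otlp" []
        if (PySem.Dict.mk pcfg).getD "endpoint" "" = "" then
          issues ++ ["otlp.endpoint not set"] else issues
      else issues) =
    issues ++ (pvRequiredKeys.foldl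
      (fun d nk => d.insert nk.1 (pvIssuesFor otel_config nk.1 nk.2))
      (PySem.Dict.mk [])).getD provider [] := by
  rw [memo_getD_eq]
  by_cases h1 : provider = "langfuse"
  · subst h1
    simp only [pvIssuesFor]
    by_cases c1 : (PySem.Dict.mk ((PySem.Dict.mk otel_config).getD "langfuse" [])).getD "public_key" "" = "" <;>
      by_cases c2 : (PySem.Dict.mk ((PySem.Dict.mk otel_config).getD "langfuse" [])).getD "secret_key" "" = "" <;>
        simp [List.filter, c1, c2]
  · by_cases h2 : provider = "otlp"
    · subst h2
      simp only [if_neg h1, pvIssuesFor]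
      by_cases c1 : (PySem.Dict.mk ((PySem.Dict.mk otel_config).getD "otlp" [])).getD "endpoint" "" = "" <;>
        simp [List.filter, c1]
    · simp [h1, h2]

-- ===== VERDICT (by name: the statement is the Claim_ definition above) =====
theorem collect_provider_issues_py_spec : Claim_equal_collect_provider_issues_py := by
  intro otel_config providers _
  unfold Spec_collect_provider_issues_py collect_provider_issues_py collect_provider_issues_py_alt
  by_cases hp : providers = []
  · simp [hp]
  · simp only [hp, if_false]
    apply PySem.List.foldl_congr_mem
    intro acc a _
    exact collect_step_eq otel_config acc a
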